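-- pv_equiv track=rewrite | github.com/suddi/coding-challenges | src/arrays/ascending_sublists.py | solution
-- ===== SOURCE A (Python) =====
-- def solution(A):                                                    # O(N)
--     """
--     Write a function to group together all ascending sublists within a list a.
--
--     >>> solution([1, 2, 10, 10, 8, 12, 5, 23, 1])
--     [[1, 2, 10, 10], [8, 12], [5, 23], [1]]
--     >>> solution([3, 4, 5, 12, 2, 3, 5, 2, 5, -1])
--     [[3, 4, 5, 12], [2, 3, 5], [2, 5], [-1]]
--     """
--     output = []                                                     # O(1)
--     inner = []                                                      # O(1)
--
--     for value in A:                                                 # O(N)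
--         if not inner or value >= inner[-1]:                         # O(1)
--             inner.append(value)                                     # O(1)
--         elif value < inner[-1]:                                     # O(1)
--             output.append(inner)                                    # O(1)
--             inner = [value]                                         # O(1)
--
--     if inner:                                                       # O(1)
--         output.append(inner)                                        # O(1)
--
--     return output                                                   # O(1)
-- ===== SOURCE B (Python) =====
-- def solution(A):
--     # Alternative decomposition: scan A back-to-front, building the groups
--     # (and each group) in reverse, then undo both reversals at the end.
--     rev = []
--     for v in reversed(A):
--         if rev and v <= rev[-1][-1]:
--             rev[-1].append(v)
--         else:
--             rev.append([v])
--     return [g[::-1] for g in reversed(rev)]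
-- ===== Notes on version B (the rewrite author's own statement) =====
-- stated objective: alternative
-- what changed: A accumulates a pending run front-to-back and flushes it on each descent; B traverses the list back-to-front, growing reversed groups at the end of a reversed list of groups, and undoes both reversals in a final pass.
import Mathlib
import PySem

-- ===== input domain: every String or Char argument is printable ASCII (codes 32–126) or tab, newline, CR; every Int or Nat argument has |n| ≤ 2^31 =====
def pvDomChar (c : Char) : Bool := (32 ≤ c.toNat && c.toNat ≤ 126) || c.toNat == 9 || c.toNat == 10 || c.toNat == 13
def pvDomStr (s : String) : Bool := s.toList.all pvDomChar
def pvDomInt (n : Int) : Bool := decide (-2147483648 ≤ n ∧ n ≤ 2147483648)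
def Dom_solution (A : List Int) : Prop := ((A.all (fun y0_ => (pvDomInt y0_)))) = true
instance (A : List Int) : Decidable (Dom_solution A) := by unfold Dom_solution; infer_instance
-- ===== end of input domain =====

-- B changes only the traversal: back-to-front with reversed groups instead of A's
-- accumulate-and-flush forward loop; same O(n) cost, same return value.

-- ===== PORT A =====
-- the loop body of A: state = (output, inner)
def aStep (s : List (List Int) × List Int) (v : Int) : List (List Int) × List Int :=
  match PySem.List.pyGet? s.2 (-1) with
  | none => (s.1, s.2 ++ [v])                      -- 'not inner'
  | some last =>
    if v ≥ last then (s.1, s.2 ++ [v])             -- 'value >= inner[-1]'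
    else if v < last then (s.1 ++ [s.2], [v])      -- 'elif value < inner[-1]'
    else s                                          -- (unreachable in Python)

def solution (A : List Int) : List (List Int) :=
  let r := A.foldl aStep ([], [])
  if r.2 = [] then r.1 else r.1 ++ [r.2]           -- 'if inner: output.append(inner)'

-- ===== PORT B =====
-- the loop body of B: rev = groups in reverse, each group reversed
def bStep (rev : List (List Int)) (v : Int) : List (List Int) :=
  match rev.getLast? with                          -- 'rev and …' / rev[-1]
  | none => rev ++ [[v]]
  | some g =>
    match g.getLast? with                          -- rev[-1][-1]
    | none => rev ++ [[v]]                         -- (unreachable: groups nonempty)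
    | some l => if v ≤ l then rev.dropLast ++ [g ++ [v]] else rev ++ [[v]]

def solution_alt (A : List Int) : List (List Int) :=
  ((A.reverse.foldl bStep []).reverse).map List.reverse

-- ===== PRECONDITION & SPEC =====
def Spec_solution (A : List Int) (out : List (List Int)) : Prop := out = solution_alt A
instance (A : List Int) (out : List (List Int)) : Decidable (Spec_solution A out) := by unfold Spec_solution; infer_instance

-- ===== CLAIM (what is proved, stated in full; the proofs are below) =====
def Claim_equal_solution : Prop := ∀ (A : List Int), Dom_solution A → Spec_solution A (solution A)

-- ===== LEMMAS AND PROOFS =====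

-- canonical grouping both ports are reduced to
def takeRun (p : Int) : List Int → List Int
  | [] => []
  | v :: vs => if p ≤ v then v :: takeRun v vs else []

def dropRun (p : Int) : List Int → List Int
  | [] => []
  | v :: vs => if p ≤ v then dropRun v vs else v :: vs

theorem dropRun_length_le (p : Int) (l : List Int) : (dropRun p l).length ≤ l.length := by
  induction l generalizing p with
  | nil => simp [dropRun]
  | cons v vs ih =>
    simp only [dropRun]
    split
    · exact le_trans (ih v) (by simp)
    · simp

def chop : List Int → List (List Int)
  | [] => []
  | x :: xs => (x :: takeRun x xs) :: chop (dropRun x xs)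
termination_by l => l.length
decreasing_by simpa using Nat.lt_succ_of_le (dropRun_length_le x xs)

-- A-side loop invariant
theorem aLoop (rest : List Int) (out : List (List Int)) (inner : List Int) (l : Int)
    (h : inner.getLast? = some l) :
    (let r := rest.foldl aStep (out, inner); if r.2 = [] then r.1 else r.1 ++ [r.2])
      = out ++ (inner ++ takeRun l rest) :: chop (dropRun l rest) := by
  induction rest generalizing out inner l with
  | nil =>
    have hne : inner ≠ [] := by intro e; simp [e] at h
    simp [takeRun, dropRun, chop, hne]
  | cons v rest ih =>
    simp only [List.foldl_cons]
    have hstep : aStep (out, inner) v =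
        if l ≤ v then (out, inner ++ [v]) else (out ++ [inner], [v]) := by
      simp only [aStep, PySem.List.pyGet?_neg_one, h]
      by_cases hv : l ≤ v
      · simp [hv, ge_iff_le]
      · simp [hv, ge_iff_le, show v < l by omega]
    by_cases hv : l ≤ v
    · rw [hstep, if_pos hv,
        ih out (inner ++ [v]) v (by simp)]
      simp [takeRun, dropRun, hv]
    · rw [hstep, if_neg hv,
        ih (out ++ [inner]) [v] v (by simp)]
      simp only [takeRun, dropRun, if_neg hv, chop]
      simp
    
theorem solution_eq_chop (A : List Int) : solution A = chop A := by
  cases A with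
  | nil => simp [solution, chop]
  | cons x xs =>
    simp only [solution, List.foldl_cons]
    have h0 : aStep ([], []) x = ([], [x]) := by
      simp [aStep, PySem.List.pyGet?_neg_one]
    rw [h0]
    have := aLoop xs [] [x] x (by simp)
    simp only [] at this
    rw [this]
    simp [chop]

-- B-side loop invariant: the reversed/reversed state equals chop
theorem bLoop (s : List Int) :
    s.reverse.foldl bStep [] = ((chop s).map List.reverse).reverse := by
  induction s with
  | nil => simp [chop]
  | cons v s ih =>
    rw [show (v :: s).reverse = s.reverse ++ [v] by simp, List.foldl_append, ih]
    cases s with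
    | nil => simp [chop, bStep, takeRun, dropRun]
    | cons y t =>
      have hc : chop (y :: t) = (y :: takeRun y t) :: chop (dropRun y t) := by
        rw [chop]
      rw [hc]
      have hcv : chop (v :: y :: t) =
          (v :: takeRun v (y :: t)) :: chop (dropRun v (y :: t)) := by rw [chop]
      simp only [List.map_cons, List.reverse_cons, List.foldl_cons, List.foldl_nil, bStep,
        List.getLast?_concat]
      by_cases hv : v ≤ y
      · simp only [hv, List.dropLast_concat, hcv, takeRun, dropRun,
          if_pos hv, List.map_cons, List.reverse_cons]
        simp
      · simp only [if_neg hv, hcv, takeRun, dropRun, List.map_cons,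
          List.reverse_cons]
        simp [hc]

theorem solution_alt_eq_chop (A : List Int) : solution_alt A = chop A := by
  unfold solution_alt
  rw [bLoop]
  simp

-- ===== VERDICT (by name: the statement is the Claim_ definition above) =====
theorem solution_spec : Claim_equal_solution := by
  intro A _
  unfold Spec_solution
  rw [solution_eq_chop, solution_alt_eq_chop]
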